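-- pv_equiv track=rewrite | github.com/lianglee123/leetcode | one_to_ten/string_to_integer.py | read_number_str
-- ===== SOURCE A (Python) =====
-- def read_number_str(str: str):
--     str = str.lstrip()
--     a = ''
--     if str.startswith("-") or str.startswith("+"):
--         a = str[0]
--         str = str[1:]
--     for c in str:
--         if c in ('0123456789'):
--             a += c
--         else:
--             break
--     if a == "+" or a == "-":
--         return ''
--     return a
-- ===== SOURCE B (Python) =====
-- def read_number_str(str):
--     t = str.lstrip()
--     sign = t[:1] if t[:1] in ('+', '-') else ''
--     body = t[len(sign):]
--     n = next((i for i, c in enumerate(body) if c not in '0123456789'), len(body))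
--     return sign + body[:n] if n > 0 else ''
-- ===== Notes on version B (the rewrite author's own statement) =====
-- stated objective: simpler
-- what changed: Replaces A's accumulate-with-break character loop and lone-sign post-check by a slicing decomposition: take the optional sign with t[:1], find the first non-digit index with next(enumerate(...)), and slice the digit run; the lone-sign case falls out of the n > 0 test.
import Mathlib
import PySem

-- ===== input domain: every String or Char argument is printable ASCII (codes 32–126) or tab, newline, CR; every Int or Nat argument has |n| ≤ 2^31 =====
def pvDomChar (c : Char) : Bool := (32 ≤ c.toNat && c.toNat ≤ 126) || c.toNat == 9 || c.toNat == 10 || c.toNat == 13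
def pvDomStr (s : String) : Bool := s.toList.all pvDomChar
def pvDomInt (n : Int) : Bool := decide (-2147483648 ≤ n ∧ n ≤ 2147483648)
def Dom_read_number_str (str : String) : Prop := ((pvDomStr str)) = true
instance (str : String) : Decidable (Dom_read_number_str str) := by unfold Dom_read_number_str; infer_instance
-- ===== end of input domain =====

-- B replaces A's accumulate-with-break loop and lone-sign post-check by slicing: take the sign
-- with t[:1], locate the first non-digit index, and slice the digit run (objective: simpler).

def pvDigits : List Char := ['0','1','2','3','4','5','6','7','8','9']

-- ===== PORT A =====
-- A's for-loop with break: accumulate digits into a, stop at the first non-digit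
def rnsLoop (a : List Char) (cs : List Char) : List Char :=
  match cs with
  | [] => a
  | c :: rest => if c ∈ pvDigits then rnsLoop (a ++ [c]) rest else a

def read_number_str (str : String) : String :=
  let s := PySem.Chars.lstrip str.toList
  let p := if PySem.Chars.startswith s ['-'] || PySem.Chars.startswith s ['+']
           then (PySem.List.slice s none (some 1), PySem.List.slice s (some 1) none)
           else (([] : List Char), s)
  let a := rnsLoop p.1 p.2
  if a = ['+'] ∨ a = ['-'] then "" else String.ofList a

-- ===== PORT B =====
-- next((i for i, c in enumerate(body) if c not in '0123456789'), len(body))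
def firstNonDigit (body : List Char) : Nat :=
  match body.findIdx? (fun c => c ∉ pvDigits) with
  | some i => i
  | none => body.length

def read_number_str_alt (str : String) : String :=
  let t := PySem.Chars.lstrip str.toList
  let tk := PySem.List.slice t none (some 1)
  let sign := if tk = ['+'] ∨ tk = ['-'] then tk else []
  let body := PySem.List.slice t (some (sign.length : Int)) none
  let n := firstNonDigit body
  if 0 < n then String.ofList (sign ++ body.take n) else ""

-- ===== PRECONDITION & SPEC =====
def Spec_read_number_str (str : String) (out : String) : Prop := out = read_number_str_alt str
instance (str : String) (out : String) : Decidable (Spec_read_number_str str out) := by unfold Spec_read_number_str; infer_instance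

-- ===== CLAIM (what is proved, stated in full; the proofs are below) =====
def Claim_equal_read_number_str : Prop := ∀ (str : String), Dom_read_number_str str → Spec_read_number_str str (read_number_str str)

-- ===== LEMMAS AND PROOFS =====

lemma rnsLoop_eq (a cs : List Char) :
    rnsLoop a cs = a ++ cs.takeWhile (fun c => decide (c ∈ pvDigits)) := by
  induction cs generalizing a with
  | nil => simp [rnsLoop]
  | cons c rest ih =>
    by_cases h : c ∈ pvDigits <;> simp [rnsLoop, h, ih]

lemma firstNonDigit_eq_length (cs : List Char) :
    firstNonDigit cs = (cs.takeWhile (fun c => decide (c ∈ pvDigits))).length := by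
  unfold firstNonDigit
  induction cs with
  | nil => simp
  | cons c rest ih =>
    by_cases h : c ∈ pvDigits
    · rw [show ((c::rest).findIdx? (fun c => decide (c ∉ pvDigits))) =
          (rest.findIdx? (fun c => decide (c ∉ pvDigits))).map (· + 1) by
        simp [List.findIdx?_cons, h]]
      cases hf : rest.findIdx? (fun c => decide (c ∉ pvDigits)) with
      | none => rw [hf] at ih; simp [h, ih]
      | some i => rw [hf] at ih; simp [h, ih]
    · simp [List.findIdx?_cons, h]

lemma takeWhile_ne_plus_minus (cs : List Char) :
    cs.takeWhile (fun c => decide (c ∈ pvDigits)) ≠ ['+'] ∧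
    cs.takeWhile (fun c => decide (c ∈ pvDigits)) ≠ ['-'] := by
  constructor <;> intro h <;>
    have := List.mem_takeWhile_imp (l := cs) (p := fun c => decide (c ∈ pvDigits))
      (by rw [h]; exact List.mem_singleton.mpr rfl) <;> simp [pvDigits] at this

lemma take_takeWhile_length (p : Char → Bool) (cs : List Char) :
    cs.take ((cs.takeWhile p).length) = cs.takeWhile p :=
  (List.prefix_iff_eq_take.mp (List.takeWhile_prefix p)).symm

theorem read_number_str_spec : Claim_equal_read_number_str := by
  intro str _
  unfold Spec_read_number_str read_number_str read_number_str_alt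
  cases hL : PySem.Chars.lstrip str.toList with
  | nil => decide
  | cons c rest =>
    have htake : PySem.List.slice (c :: rest) none (some 1) = [c] := by simp [pysem]
    have hdrop : PySem.List.slice (c :: rest) (some 1) none = rest := by simp [pysem]
    have hdrop0 : PySem.List.slice (c :: rest) (some 0) none = c :: rest := by simp [pysem]
    by_cases hs : c = '+' ∨ c = '-'
    · rcases hs with rfl | rfl <;>
      · cases htw : rest.takeWhile (fun c => decide (c ∈ pvDigits)) with
        | nil =>
          simp [PySem.Chars.startswith, List.isPrefixOf, htake, hdrop,
            firstNonDigit_eq_length, rnsLoop_eq, htw]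
        | cons d tl =>
          have htt := take_takeWhile_length (fun c => decide (c ∈ pvDigits)) rest
          rw [htw] at htt
          simp only [List.length_cons] at htt
          simp [PySem.Chars.startswith, List.isPrefixOf, htake, hdrop,
            firstNonDigit_eq_length, htt, rnsLoop_eq, htw]
    · have hcp : c ≠ '+' := fun h => hs (Or.inl h)
      have hcm : c ≠ '-' := fun h => hs (Or.inr h)
      have hor : ¬ ('-' = c ∨ '+' = c) := by
        rintro (h | h)
        · exact hcm h.symm
        · exact hcp h.symm
      rcases takeWhile_ne_plus_minus (c :: rest) with ⟨hp, hm⟩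
      cases htw : (c :: rest).takeWhile (fun c => decide (c ∈ pvDigits)) with
      | nil =>
        rw [htw] at hp hm
        simp [PySem.Chars.startswith, List.isPrefixOf, htake, hdrop0, hcp, hcm, hor,
          firstNonDigit_eq_length, rnsLoop_eq, htw]
      | cons d tl =>
        rw [htw] at hp hm
        have htt := take_takeWhile_length (fun c => decide (c ∈ pvDigits)) (c :: rest)
        rw [htw] at htt
        simp only [List.length_cons] at htt
        simp [PySem.Chars.startswith, List.isPrefixOf, htake, hdrop0, hcp, hcm, hor,
          firstNonDigit_eq_length, htt, rnsLoop_eq, htw, hp, hm]
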